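-- pv_equiv track=rewrite | github.com/sxyeonn/Algorithm | 프로그래머스/1/17681. ［1차］ 비밀지도/［1차］ 비밀지도.py | solution
-- ===== SOURCE A (Python) =====
-- def solution(n, arr1, arr2):
--     answer = []
--
--     for i in range(n):
--         # 2진수 연산 진행
--         num = bin(arr1[i] | arr2[i])
--         # 자리수를 통일해주는 함수(zfill)
--         num = num[2:].zfill(n)
--         num = num.replace("1", "#")
--         num = num.replace("0", " ")
--         answer.append(num)
--     return answer
-- ===== SOURCE B (Python) =====
-- def solution(n, arr1, arr2):
--     # Per-bit extraction: peel the low bit of the OR value until it is zero,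
--     # then right-justify the row to width n.
--     rows = []
--     for i in range(n):
--         v = arr1[i] | arr2[i]
--         cells = []
--         while v > 0:
--             cells.append('#' if v & 1 else ' ')
--             v >>= 1
--         rows.append(''.join(reversed(cells)).rjust(n))
--     return rows
-- ===== Notes on version B (the rewrite author's own statement) =====
-- stated objective: alternative
-- what changed: Each row is built by a while loop that peels the low bit of the OR value ('#' if v & 1 else ' ') while v > 0, reversing the cells and right-justifying to width n, instead of formatting bin(v), slicing off '0b', zfill-padding and two str.replace passes; Pre_ excludes n beyond a list length (A raises IndexError) and negative map values among the first n (A's bin() leaks a 'b' into the row, a corner outside the binary-map format).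
-- outside the precondition, e.g. on solution(1, [-1], [0]): A returns ['b#'], B returns [' ']; on solution(2, [1], [0, 0]): A raises IndexError, B raises IndexError
import Mathlib
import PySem

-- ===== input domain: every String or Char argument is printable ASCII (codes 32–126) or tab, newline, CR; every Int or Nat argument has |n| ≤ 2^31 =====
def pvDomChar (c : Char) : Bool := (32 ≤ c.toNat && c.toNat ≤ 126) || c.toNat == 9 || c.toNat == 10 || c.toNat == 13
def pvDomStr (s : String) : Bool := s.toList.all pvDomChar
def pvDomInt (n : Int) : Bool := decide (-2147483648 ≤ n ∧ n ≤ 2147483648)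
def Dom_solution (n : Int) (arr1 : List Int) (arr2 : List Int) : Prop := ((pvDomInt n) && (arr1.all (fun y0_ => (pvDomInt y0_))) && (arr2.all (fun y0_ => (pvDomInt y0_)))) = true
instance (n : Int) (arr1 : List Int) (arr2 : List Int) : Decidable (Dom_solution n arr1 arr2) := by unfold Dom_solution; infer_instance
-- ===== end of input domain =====

-- B builds each row by peeling bits off the OR value in a while loop and right-justifying,
-- instead of A's bin()/zfill()/replace() string-formatting pipeline (objective: alternative).

-- ===== PORT A =====
-- literal port of A: for i in range(n): num = bin(arr1[i]|arr2[i]); num = num[2:].zfill(n);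
-- two replaces; answer.append(num).  Indexing uses pyGet?; Pre_ keeps i in range, so .getD 0
-- is never taken where Python would raise.
def solution (n : Int) (arr1 : List Int) (arr2 : List Int) : List String :=
  (PySem.List.pyRange 0 n 1).foldl
    (fun answer i =>
      let num0 := PySem.Int.pyBin
        (PySem.Int.bor ((PySem.List.pyGet? arr1 i).getD 0) ((PySem.List.pyGet? arr2 i).getD 0))
      let num1 := PySem.Str.zfill (PySem.Str.slice num0 (some 2) none) n
      let num2 := PySem.Str.replace num1 "1" "#"
      let num3 := PySem.Str.replace num2 "0" " "
      answer ++ [num3]) []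

-- ===== PORT B =====
-- Source B's while loop: while v > 0: cells.append('#' if v & 1 else ' '); v >>= 1.
-- guard v > 0 matches Python's loop condition exactly.
def pvBitsLoop (v : Int) (cells : List Char) : List Char :=
  if 0 < v then
    pvBitsLoop (v >>> (1 : Nat)) (cells ++ [if PySem.Int.band v 1 ≠ 0 then '#' else ' '])
  else cells
termination_by v.toNat
decreasing_by
  rename_i h
  have hv : v >>> (1 : Nat) = v / 2 := by
    rw [Int.shiftRight_eq_div_pow]; norm_num
  omega

-- hand port of str.rjust(n) with fill ' ' (not in PySem): left-pad to width n; exact,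
-- including n ≤ len (no change) and negative n.
def pvRjust (cs : List Char) (n : Int) : List Char :=
  List.replicate (n.toNat - cs.length) ' ' ++ cs

-- literal port of Source B: for i in range(n): v = arr1[i] | arr2[i]; bit loop; reversed; rjust(n)
def solution_alt (n : Int) (arr1 : List Int) (arr2 : List Int) : List String :=
  (PySem.List.pyRange 0 n 1).foldl
    (fun rows i =>
      let v := PySem.Int.bor ((PySem.List.pyGet? arr1 i).getD 0) ((PySem.List.pyGet? arr2 i).getD 0)
      rows ++ [String.ofList (pvRjust (pvBitsLoop v []).reverse n)]) []

-- ===== PRECONDITION & SPEC =====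
-- Pre_ excludes (a) n larger than a list length, where A raises IndexError, and
-- (b) negative entries among the first n map values: binary map rows are nonnegative by the
-- task's nature, and there A's bin() prefix leaks a 'b' character into the row.
def Pre_solution (n : Int) (arr1 : List Int) (arr2 : List Int) : Prop :=
  n ≤ (arr1.length : Int) ∧ n ≤ (arr2.length : Int) ∧
  (∀ x ∈ arr1.take n.toNat, 0 ≤ x) ∧ (∀ x ∈ arr2.take n.toNat, 0 ≤ x)
instance (n : Int) (arr1 : List Int) (arr2 : List Int) : Decidable (Pre_solution n arr1 arr2) := by
  unfold Pre_solution; infer_instance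

def pvWitness_solution : Int × List Int × List Int := (2, [9, 20], [30, 1, 3])

def Spec_solution (n : Int) (arr1 : List Int) (arr2 : List Int) (out : List String) : Prop :=
  out = solution_alt n arr1 arr2
instance (n : Int) (arr1 : List Int) (arr2 : List Int) (out : List String) :
    Decidable (Spec_solution n arr1 arr2 out) := by unfold Spec_solution; infer_instance

-- ===== CLAIM (what is proved, stated in full; the proofs are below) =====
def Claim_equal_solution : Prop := ∀ (n : Int) (arr1 : List Int) (arr2 : List Int),
  Dom_solution n arr1 arr2 → Pre_solution n arr1 arr2 →
  Spec_solution n arr1 arr2 (solution n arr1 arr2)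

-- ===== LEMMAS AND PROOFS =====

-- append-accumulator foldl is a map
theorem pv_foldl_push {α β : Type} (f : α → β) (l : List α) (acc : List β) :
    l.foldl (fun a x => a ++ [f x]) acc = acc ++ l.map f := by
  induction l generalizing acc with
  | nil => simp
  | cons x t ih => simp [ih, List.foldl_cons]

-- toDigitsCore: accumulator peels off
theorem pv_core_acc (f n : Nat) (acc : List Char) :
    Nat.toDigitsCore 2 f n acc = Nat.toDigitsCore 2 f n [] ++ acc := by
  induction f generalizing n acc with
  | zero => simp [Nat.toDigitsCore]
  | succ f ih =>
    simp only [Nat.toDigitsCore]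
    by_cases h : n / 2 = 0
    · simp [h]
    · simp only [h, if_false]
      rw [ih (n / 2) ((n % 2).digitChar :: acc), ih (n / 2) [(n % 2).digitChar]]
      simp

-- toDigitsCore: fuel beyond n is irrelevant
theorem pv_core_fuel (f g n : Nat) (hf : n < f) (hg : n < g) :
    Nat.toDigitsCore 2 f n [] = Nat.toDigitsCore 2 g n [] := by
  induction f generalizing g n with
  | zero => omega
  | succ f ih =>
    cases g with
    | zero => omega
    | succ g =>
      simp only [Nat.toDigitsCore]
      by_cases h : n / 2 = 0
      · simp [h]
      · simp only [h, if_false]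
        rw [pv_core_acc f, pv_core_acc g, ih g (n / 2) (by omega) (by omega)]

-- recursive characterisation of Nat.toDigits 2
theorem pv_toDigits_two_step (m : Nat) (hm : 2 ≤ m) :
    Nat.toDigits 2 m = Nat.toDigits 2 (m / 2) ++ [(m % 2).digitChar] := by
  unfold Nat.toDigits
  have h2 : m / 2 ≠ 0 := by omega
  conv_lhs => rw [Nat.toDigitsCore.eq_def]
  simp only [h2, if_false]
  rw [pv_core_acc m, pv_core_fuel m (m / 2 + 1) (m / 2) (by omega) (by omega)]

-- the binary-digit char pattern of the w low bits, high bit first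
def pvBits (m : Nat) (w : Nat) : List Char :=
  (List.range w).reverse.map (fun j => if m >>> j % 2 = 1 then '1' else '0')

-- bitLength on Nat casts, convenience
theorem pv_bl_pos (m : Nat) (hm : 0 < m) :
    PySem.Int.bitLength (m : Int) = PySem.Int.bitLength ((m / 2 : Nat) : Int) + 1 :=
  PySem.Int.bitLength_natCast hm

theorem pv_bit_shift (m j : Nat) : (m / 2) >>> j = m >>> (j + 1) := by
  simp only [Nat.shiftRight_eq_div_pow, Nat.div_div_eq_div_mul, pow_succ]
  rw [Nat.mul_comm]

-- pulling the LOW bit: pvBits of the quotient, then the parity char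
theorem pvBits_low (m w : Nat) :
    pvBits m (w + 1) = pvBits (m / 2) w ++ [if m % 2 = 1 then '1' else '0'] := by
  unfold pvBits
  rw [List.range_succ_eq_map, List.reverse_cons, List.map_append, List.map_reverse,
    List.map_map, ← List.map_reverse]
  congr 1
  apply List.map_congr_left
  intro j _
  simp only [Function.comp_apply, Nat.succ_eq_add_one, pv_bit_shift]

theorem pv_toDigits_eq_pvBits (m : Nat) (hm : 0 < m) :
    Nat.toDigits 2 m = pvBits m (PySem.Int.bitLength (m : Int)) := by
  induction m using Nat.strong_induction_on with
  | _ m ih =>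
    by_cases h2 : m < 2
    · have : m = 1 := by omega
      subst this
      decide
    · rw [pv_toDigits_two_step m (by omega), pv_bl_pos m hm, pvBits_low,
        ← ih (m / 2) (by omega) (by omega)]
      congr 1
      rcases Nat.mod_two_eq_zero_or_one m with h | h <;> rw [h] <;> decide

-- zfill on a digit-headed nonempty list is plain left padding
theorem pv_zfill_digits (cs : List Char) (n : Int) (hne : cs ≠ [])
    (hd : ¬ (cs.head hne = '+' ∨ cs.head hne = '-')) :
    PySem.Chars.zfill cs n = List.replicate (n.toNat - cs.length) '0' ++ cs := by
  unfold PySem.Chars.zfill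
  by_cases h : n ≤ (cs.length : Int)
  · have : n.toNat - cs.length = 0 := by omega
    simp [h, this]
  · cases cs with
    | nil => exact absurd rfl hne
    | cons c rest =>
      simp only [List.head] at hd
      simp [hd]
      omega

-- replace with singleton pattern is a map (via replace.go)
theorem pv_replace_go_single (a b : Char) (hne : b ≠ a) :
    ∀ (fuel : Nat) (l acc : List Char), l.length ≤ fuel →
    PySem.Chars.replace.go [a] [b] fuel l acc =
      acc.reverse ++ l.map (fun c => if c = a then b else c) := by
  intro fuel
  induction fuel with
  | zero =>
    intro l acc h
    have : l = [] := by cases l <;> simp_all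
    subst this
    simp [PySem.Chars.replace.go]
  | succ fuel ih =>
    intro l acc h
    cases l with
    | nil => simp [PySem.Chars.replace.go]
    | cons c t =>
      simp only [PySem.Chars.replace.go]
      by_cases hc : c = a
      · have hpre : List.isPrefixOf [a] (c :: t) = true := by
          simp [List.isPrefixOf, hc]
        rw [if_pos hpre]
        have hdrop : List.drop (List.length [a]) (c :: t) = t := by simp
        rw [hdrop, ih t ([b].reverse ++ acc) (by simpa using Nat.le_of_succ_le_succ h)]
        simp [hc]
      · have hpre : ¬ List.isPrefixOf [a] (c :: t) = true := by
          simp [List.isPrefixOf]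
          exact fun h' => hc h'.symm
        rw [if_neg hpre]
        rw [ih t (c :: acc) (by simpa using Nat.le_of_succ_le_succ h)]
        simp [hc]

theorem pv_replace_single (a b : Char) (hne : b ≠ a) (cs : List Char) :
    PySem.Chars.replace cs [a] [b] = cs.map (fun c => if c = a then b else c) := by
  unfold PySem.Chars.replace
  simp only [List.isEmpty_cons]
  exact pv_replace_go_single a b hne cs.length cs [] (le_refl _)

-- every char of pvBits is a binary digit
theorem pvBits_mem (m w : Nat) (c : Char) (hc : c ∈ pvBits m w) : c = '1' ∨ c = '0' := by
  unfold pvBits at hc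
  obtain ⟨j, _, hj⟩ := List.mem_map.mp hc
  by_cases h : m >>> j % 2 = 1
  · left; rw [← hj]; simp [h]
  · right; rw [← hj]; simp [h]

theorem pvBits_length (m w : Nat) : (pvBits m w).length = w := by
  simp [pvBits]

-- Nat.toDigits 2 m is pvBits at width max 1 (bitLength m)
theorem pv_toDigits_eq_pvBits' (m : Nat) :
    Nat.toDigits 2 m = pvBits m (max 1 (PySem.Int.bitLength (m : Int))) := by
  by_cases hm : 0 < m
  · have h1 : 1 ≤ PySem.Int.bitLength (m : Int) := by
      rw [pv_bl_pos m hm]; omega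
    rw [pv_toDigits_eq_pvBits m hm]
    congr 1
    omega
  · have : m = 0 := by omega
    subst this
    decide

-- the two replace maps, composed
def pvRepl (c : Char) : Char :=
  if (if c = '1' then '#' else c) = '0' then ' ' else (if c = '1' then '#' else c)

-- B's bit loop: the accumulator peels off
theorem pv_loop_acc (k : Nat) (v : Int) (hk : v.toNat ≤ k) (cs : List Char) :
    pvBitsLoop v cs = cs ++ pvBitsLoop v [] := by
  induction k generalizing v cs with
  | zero =>
    have h : ¬ 0 < v := by omega
    rw [pvBitsLoop, if_neg h, pvBitsLoop, if_neg h]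
    simp
  | succ k ih =>
    by_cases h : 0 < v
    · have hv : v >>> (1 : Nat) = v / 2 := by
        rw [Int.shiftRight_eq_div_pow]; norm_num
      have hlt : (v >>> (1 : Nat)).toNat ≤ k := by omega
      have hR : pvBitsLoop v [] =
          [if PySem.Int.band v 1 ≠ 0 then '#' else ' '] ++ pvBitsLoop (v >>> (1 : Nat)) [] := by
        rw [pvBitsLoop]
        simp only [if_pos h]
        rw [ih _ hlt]
        simp
      rw [pvBitsLoop]
      simp only [if_pos h]
      rw [ih _ hlt, hR]
      simp
    · rw [pvBitsLoop, if_neg h, pvBitsLoop, if_neg h]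
      simp

-- the char the two replace passes produce, composed
theorem pvRepl_eq (c : Char) :
    (if (if c = '1' then '#' else c) = '0' then ' ' else (if c = '1' then '#' else c))
      = pvRepl c := rfl

-- B's bit loop, reversed, is A's digit string after both replaces
theorem pv_loop_eq (m : Nat) (hm : 0 < m) :
    (pvBitsLoop (m : Int) []).reverse = (Nat.toDigits 2 m).map pvRepl := by
  induction m using Nat.strong_induction_on with
  | _ m ih =>
    have hsh : ((m : Int) >>> (1 : Nat)) = ((m / 2 : Nat) : Int) := by
      have hv : (m : Int) >>> (1 : Nat) = (m : Int) / 2 := by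
        rw [Int.shiftRight_eq_div_pow]; norm_num
      omega
    have hc : (if PySem.Int.band (m : Int) 1 ≠ 0 then '#' else ' ')
        = pvRepl ((m % 2).digitChar) := by
      have hmod : PySem.Int.mod (m : Int) 2 = ((m % 2 : Nat) : Int) := by
        exact_mod_cast PySem.Int.mod_natCast m 2
      rw [PySem.Int.band_one, hmod]
      rcases Nat.mod_two_eq_zero_or_one m with h | h <;> rw [h] <;> decide
    by_cases h2 : m < 2
    · have : m = 1 := by omega
      subst this
      rw [pvBitsLoop]
      norm_num
      rw [pvBitsLoop]
      decide
    · rw [pvBitsLoop, if_pos (by exact_mod_cast hm), hsh,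
        pv_loop_acc (m / 2) _ (by omega), pv_toDigits_two_step m (by omega)]
      simp only [List.nil_append, List.reverse_append, List.reverse_cons, List.reverse_nil,
        List.nil_append, List.map_append, List.map_cons, List.map_nil]
      rw [ih (m / 2) (by omega) (by omega), hc]

-- row equality: A's formatting pipeline equals B's bit loop + rjust, nonneg value, n ≥ 1
theorem pv_row_eq (n : Int) (m : Nat) (hn : 1 ≤ n) :
    PySem.Str.replace (PySem.Str.replace
      (PySem.Str.zfill (PySem.Str.slice (PySem.Int.pyBin (m : Int)) (some 2) none) n) "1" "#")
      "0" " " = String.ofList (pvRjust (pvBitsLoop (m : Int) []).reverse n) := by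
  rw [← String.toList_inj]
  have hslice : (PySem.Str.slice (PySem.Int.pyBin (m : Int)) (some 2) none).toList =
      Nat.toDigits 2 m := by
    rw [PySem.Str.toList_slice, PySem.Int.toList_pyBin, PySem.Chars.slice_eq_listSlice,
      PySem.List.slice_from _ (by norm_num : (0:Int) ≤ 2)]
    unfold PySem.Int.toBinChars0b
    rw [if_neg (by omega : ¬ ((m : Int) < 0))]
    simp
  have hne : Nat.toDigits 2 m ≠ [] := by
    intro h
    have := congrArg List.length h
    rw [pv_toDigits_eq_pvBits', pvBits_length] at this
    simp at this
  have hhd : ¬ ((Nat.toDigits 2 m).head hne = '+' ∨ (Nat.toDigits 2 m).head hne = '-') := by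
    have hm : (Nat.toDigits 2 m).head hne ∈ pvBits m (max 1 (PySem.Int.bitLength (m : Int))) := by
      rw [← pv_toDigits_eq_pvBits']
      exact List.head_mem hne
    rcases pvBits_mem _ _ _ hm with h | h <;> rw [h] <;> decide
  have hL : (Nat.toDigits 2 m).length = max 1 (PySem.Int.bitLength (m : Int)) := by
    rw [pv_toDigits_eq_pvBits', pvBits_length]
  rw [PySem.Str.toList_replace, PySem.Str.toList_replace, PySem.Str.toList_zfill, hslice,
    pv_zfill_digits _ n hne hhd]
  have h1 : ("1" : String).toList = ['1'] := rfl
  have h2 : ("#" : String).toList = ['#'] := rfl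
  have h3 : ("0" : String).toList = ['0'] := rfl
  have h4 : (" " : String).toList = [' '] := rfl
  rw [h1, h2, h3, h4, pv_replace_single '1' '#' (by decide),
    pv_replace_single '0' ' ' (by decide)]
  rw [String.toList_ofList]
  unfold pvRjust
  simp only [List.map_append, List.map_map, List.map_replicate]
  have hrep : ((fun c => if c = '0' then ' ' else c) ∘ fun c => if c = '1' then '#' else c) '0' = ' ' := by decide
  have hrep2 : (if (if '0' = '1' then '#' else '0') = '0' then ' ' else if '0' = '1' then '#' else '0') = ' ' := by decide
  rw [hrep2]
  by_cases hm : 0 < m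
  · rw [pv_loop_eq m hm]
    have hmap : (Nat.toDigits 2 m).map
        ((fun c => if c = '0' then ' ' else c) ∘ fun c => if c = '1' then '#' else c)
        = (Nat.toDigits 2 m).map pvRepl := by
      apply List.map_congr_left
      intro c _
      exact pvRepl_eq c
    rw [hmap]
    simp [hL]
  · have hm0 : m = 0 := by omega
    subst hm0
    rw [pvBitsLoop]
    norm_num
    have hch : (if '0' = '1' → '#' = '0' then ' ' else if '0' = '1' then '#' else '0') = ' ' := by
      decide
    rw [hch, ← List.replicate_succ' (n := n.toNat - 1)]
    have hn1 : n.toNat - 1 + 1 = n.toNat := by omega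
    rw [hn1]

-- the whole loops agree
theorem pv_main (n : Int) (arr1 arr2 : List Int) (h1 : n ≤ (arr1.length : Int))
    (h2 : n ≤ (arr2.length : Int)) (ha : ∀ x ∈ arr1.take n.toNat, 0 ≤ x)
    (hb : ∀ x ∈ arr2.take n.toNat, 0 ≤ x) :
    solution n arr1 arr2 = solution_alt n arr1 arr2 := by
  unfold solution solution_alt
  simp only []
  rw [pv_foldl_push, pv_foldl_push, List.nil_append, List.nil_append,
    PySem.List.pyRange_zero]
  apply List.map_congr_left
  intro i hi
  obtain ⟨k, hk, rfl⟩ := List.mem_map.mp hi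
  rw [List.mem_range] at hk
  have hk1 : k < arr1.length := by omega
  have hk2 : k < arr2.length := by omega
  have hga : PySem.List.pyGet? arr1 (k : Int) = some arr1[k] := by
    rw [PySem.List.pyGet?_natCast, List.getElem?_eq_getElem hk1]
  have hgb : PySem.List.pyGet? arr2 (k : Int) = some arr2[k] := by
    rw [PySem.List.pyGet?_natCast, List.getElem?_eq_getElem hk2]
  simp only [hga, hgb, Option.getD_some]
  have ha' : 0 ≤ arr1[k] := by
    apply ha
    rw [← List.getElem_take (j := n.toNat) (h := by simp; omega)]
    exact List.getElem_mem _
  have hb' : 0 ≤ arr2[k] := by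
    apply hb
    rw [← List.getElem_take (j := n.toNat) (h := by simp; omega)]
    exact List.getElem_mem _
  rw [PySem.Int.bor_of_nonneg ha' hb']
  exact pv_row_eq n _ (by omega)

-- ===== VERDICT (by name: the statement is the Claim_ definition above) =====
theorem solution_spec : Claim_equal_solution := by
  intro n arr1 arr2 _hd hpre
  unfold Spec_solution
  exact pv_main n arr1 arr2 hpre.1 hpre.2.1 hpre.2.2.1 hpre.2.2.2
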